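-- pv_equiv track=rewrite | github.com/ArnoldWildt/License_plate_blurring | yolo3/utils.py | check_bridge
-- ===== SOURCE A (Python) =====
-- def check_bridge(buffer):
--     counter = 0
--     ready = False
--
--     output_list = []
--     for index, frame in enumerate(buffer):
--         if len(frame[0]) > 0 and not ready:
--             ready = True
--         if len(frame[0]) <= 0 and ready:
--             counter += 1
--         if len(frame[0]) > 0:
--             if 0 < counter <= 3:
--                 output_list.append([index - 1, counter])
--             counter = 0
--
--     return output_list
-- ===== SOURCE B (Python) =====
-- def check_bridge(buffer):
--     dets = [i for i, f in enumerate(buffer) if len(f[0]) > 0]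
--     out = []
--     if dets:
--         prev = dets[0]
--         for q in dets[1:]:
--             gap = q - prev - 1
--             if 1 <= gap <= 3:
--                 out.append([q - 1, gap])
--             prev = q
--     return out
-- ===== Notes on version B (the rewrite author's own statement) =====
-- stated objective: simpler
-- what changed: Replaces the stateful counter/ready scan by two phases: collect the indices of non-empty frames, then emit [q-1, gap] for consecutive detection indices p,q whose gap q-p-1 is between 1 and 3.
import Mathlib
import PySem

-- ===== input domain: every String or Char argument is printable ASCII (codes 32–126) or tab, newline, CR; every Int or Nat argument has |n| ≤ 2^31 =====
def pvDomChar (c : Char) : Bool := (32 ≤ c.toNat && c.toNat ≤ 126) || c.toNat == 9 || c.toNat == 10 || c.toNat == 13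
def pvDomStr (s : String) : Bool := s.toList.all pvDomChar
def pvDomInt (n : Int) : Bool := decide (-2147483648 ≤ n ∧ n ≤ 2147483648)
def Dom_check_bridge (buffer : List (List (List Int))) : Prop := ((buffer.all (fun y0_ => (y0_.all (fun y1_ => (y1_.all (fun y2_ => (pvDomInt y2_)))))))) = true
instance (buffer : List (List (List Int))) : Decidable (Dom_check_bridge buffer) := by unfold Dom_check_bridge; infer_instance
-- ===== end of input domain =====

-- B replaces A's single stateful counter/ready scan by two phases (collect detection
-- indices, then scan consecutive pairs); same values, objective: simpler decomposition.

-- ===== PORT A =====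
-- the loop of A, carried over (index, counter, ready, output_list); frame[0] ported by
-- PySem.List.pyGet? (on Pre_ every frame is non-empty, so the IndexError case is excluded)
def checkBridgeLoopA : Int → Int → Bool → List (List Int) → List (List (List Int)) → List (List Int)
  | _, _, _, out, [] => out
  | i, counter, ready, out, frame :: rest =>
    let ne : Bool := ((PySem.List.pyGet? frame 0).getD []).length > 0
    let ready1 : Bool := if ne && !ready then true else ready
    let counter1 : Int := if !ne && ready1 then counter + 1 else counter
    if ne then
      let out1 := if 0 < counter1 ∧ counter1 ≤ 3 then out ++ [[i - 1, counter1]] else out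
      checkBridgeLoopA (i + 1) 0 ready1 out1 rest
    else
      checkBridgeLoopA (i + 1) counter1 ready1 out rest

def check_bridge (buffer : List (List (List Int))) : List (List Int) :=
  checkBridgeLoopA 0 0 false [] buffer

-- ===== PORT B =====
-- phase 1 of B: the comprehension building the indices of non-empty frames
def checkBridgeDets : Int → List (List (List Int)) → List Int
  | _, [] => []
  | i, f :: rest =>
    if ((PySem.List.pyGet? f 0).getD []).length > 0 then i :: checkBridgeDets (i + 1) rest
    else checkBridgeDets (i + 1) rest

-- phase 2 of B: the loop over dets[1:] carrying prev
def checkBridgePairs : Int → List Int → List (List Int)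
  | _, [] => []
  | prev, q :: rest =>
    (if 1 ≤ q - prev - 1 ∧ q - prev - 1 ≤ 3 then [[q - 1, q - prev - 1]] else [])
      ++ checkBridgePairs q rest

def check_bridge_alt (buffer : List (List (List Int))) : List (List Int) :=
  match checkBridgeDets 0 buffer with
  | [] => []
  | p :: rest => checkBridgePairs p rest

-- ===== PRECONDITION & SPEC =====
-- Pre_ excludes buffers containing an empty frame: there Python A (and B) raise IndexError on frame[0]
def Pre_check_bridge (buffer : List (List (List Int))) : Prop :=
  ∀ frame ∈ buffer, frame ≠ []
instance (buffer : List (List (List Int))) : Decidable (Pre_check_bridge buffer) := by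
  unfold Pre_check_bridge; infer_instance

def pvWitness_check_bridge : List (List (List Int)) :=
  [[[1]], [[]], [[2]], [[]], [[]], [[3]]]

def Spec_check_bridge (buffer : List (List (List Int))) (out : List (List Int)) : Prop := out = check_bridge_alt buffer
instance (buffer : List (List (List Int))) (out : List (List Int)) : Decidable (Spec_check_bridge buffer out) := by unfold Spec_check_bridge; infer_instance

-- ===== CLAIM (what is proved, stated in full; the proofs are below) =====
def Claim_equal_check_bridge : Prop := ∀ (buffer : List (List (List Int))), Dom_check_bridge buffer → Pre_check_bridge buffer → Spec_check_bridge buffer (check_bridge buffer)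

-- ===== LEMMAS AND PROOFS =====

-- the accumulator can be pulled out in front of A's loop
theorem checkBridgeLoopA_acc (l : List (List (List Int))) :
    ∀ (i counter : Int) (ready : Bool) (out : List (List Int)),
    checkBridgeLoopA i counter ready out l = out ++ checkBridgeLoopA i counter ready [] l := by
  induction l with
  | nil => intro i c r out; simp [checkBridgeLoopA]
  | cons f rest ih =>
    intro i c r out
    simp only [checkBridgeLoopA]
    split_ifs <;> (try simp only [List.nil_append]) <;>
      (conv_rhs => rw [ih]) <;> rw [ih] <;> (try simp [List.append_assoc])

-- A's loop after the first detection: counter = i - 1 - prev equals B's pair scan from prev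
theorem loopA_ready (l : List (List (List Int))) :
    ∀ (i prev : Int),
    checkBridgeLoopA i (i - 1 - prev) true [] l = checkBridgePairs prev (checkBridgeDets i l) := by
  induction l with
  | nil => intro i p; simp [checkBridgeLoopA, checkBridgeDets, checkBridgePairs]
  | cons f rest ih =>
    intro i p
    by_cases hne : ((PySem.List.pyGet? f 0).getD []).length > 0
    · simp only [checkBridgeLoopA, checkBridgeDets, checkBridgePairs, hne, decide_true,
        Bool.not_true, Bool.and_false, Bool.false_and, Bool.false_eq_true, if_false, if_true,
        ite_self, List.nil_append]
      rw [checkBridgeLoopA_acc]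
      have e2 : checkBridgeLoopA (i + 1) 0 true [] rest
          = checkBridgePairs i (checkBridgeDets (i + 1) rest) := by
        have h := ih (i + 1) i
        rwa [show i + 1 - 1 - i = (0 : Int) from by ring] at h
      rw [e2]
      congr 1
      rw [show i - 1 - p = i - p - 1 from by ring]
      split_ifs with h1 h2 h2 <;> first | rfl | (exfalso; omega)
    · simp only [checkBridgeLoopA, checkBridgeDets, hne, decide_false,
        Bool.false_and, Bool.false_eq_true, if_false, Bool.not_false, Bool.true_and, if_true,
        ite_self]
      rw [show i - 1 - p + 1 = (i + 1) - 1 - p from by ring]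
      exact ih (i + 1) p

-- A's loop before the first detection equals B
theorem loopA_start (l : List (List (List Int))) :
    ∀ (i : Int),
    checkBridgeLoopA i 0 false [] l
      = (match checkBridgeDets i l with
         | [] => []
         | p :: rest => checkBridgePairs p rest) := by
  induction l with
  | nil => intro i; simp [checkBridgeLoopA, checkBridgeDets]
  | cons f rest ih =>
    intro i
    by_cases hne : ((PySem.List.pyGet? f 0).getD []).length > 0
    · simp only [checkBridgeLoopA, checkBridgeDets, hne, decide_true, Bool.not_false,
        Bool.and_self, if_true, Bool.not_true, Bool.false_and,
        Bool.false_eq_true, if_false, List.nil_append]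
      rw [if_neg (by omega)]
      have h := loopA_ready rest (i + 1) i
      rwa [show i + 1 - 1 - i = (0 : Int) from by ring] at h
    · simp only [checkBridgeLoopA, checkBridgeDets, hne, decide_false, Bool.false_and,
        Bool.false_eq_true, if_false, Bool.not_false, Bool.and_false]
      exact ih (i + 1)

-- ===== VERDICT (by name: the statement is the Claim_ definition above) =====
theorem check_bridge_spec : Claim_equal_check_bridge := by
  intro buffer _ _
  unfold Spec_check_bridge check_bridge check_bridge_alt
  exact loopA_start buffer 0
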